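-- pv_equiv track=rewrite | github.com/thtay9178-blip/tessera | src/tessera/services/graphql.py | generate_fqn
-- ===== SOURCE A (Python) =====
-- def generate_fqn(schema_name: str, operation_name: str, operation_type: str) -> str:
--     """Generate a fully qualified name for a GraphQL operation.
--
--     Format: graphql.<schema_name>.<type>_<operation_name>
--     Example: graphql.users_api.query_list_users
--
--     Args:
--         schema_name: The schema/API name
--         operation_name: The operation name (e.g., listUsers)
--         operation_type: "query" or "mutation"
--
--     Returns:
--         A valid FQN string
--     """
--     # Normalize schema name: lowercase, replace spaces/hyphens with underscores
--     normalized_name = schema_name.lower().replace(" ", "_").replace("-", "_")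
--     # Remove any characters that aren't alphanumeric or underscore
--     normalized_name = "".join(c if c.isalnum() or c == "_" else "" for c in normalized_name)
--     # Remove consecutive underscores
--     while "__" in normalized_name:
--         normalized_name = normalized_name.replace("__", "_")
--     normalized_name = normalized_name.strip("_")
--     if not normalized_name:
--         normalized_name = "unknown"
--
--     # Normalize operation name
--     normalized_op = operation_name.lower()
--     normalized_op = "".join(c if c.isalnum() or c == "_" else "_" for c in normalized_op)
--     while "__" in normalized_op:
--         normalized_op = normalized_op.replace("__", "_")
--     normalized_op = normalized_op.strip("_")
--     if not normalized_op:
--         normalized_op = "unknown"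
--
--     return f"graphql.{normalized_name}.{operation_type}_{normalized_op}"
-- ===== SOURCE B (Python) =====
-- def generate_fqn(schema_name: str, operation_name: str, operation_type: str) -> str:
--     """Single fused pass per name: map each lowercased character and collapse
--     runs of underscores inline while building the buffer."""
--     buf = []
--     prev_us = False
--     for ch in schema_name.lower():
--         if ch.isalnum():
--             buf.append(ch)
--             prev_us = False
--         elif ch in " -_":
--             if not prev_us:
--                 buf.append("_")
--             prev_us = True
--         # any other character is dropped; the underscore flag is unchanged
--     name = "".join(buf).strip("_") or "unknown"
--
--     buf = []
--     prev_us = False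
--     for ch in operation_name.lower():
--         if ch.isalnum():
--             buf.append(ch)
--             prev_us = False
--         else:
--             if not prev_us:
--                 buf.append("_")
--             prev_us = True
--     op = "".join(buf).strip("_") or "unknown"
--
--     return f"graphql.{name}.{operation_type}_{op}"
-- ===== Notes on version B (the rewrite author's own statement) =====
-- stated objective: alternative
-- what changed: Replaces A's multi-pass pipeline (two str.replace passes, a join-filter, and a repeated whole-string '__'-replace loop) by one fused pass per name that maps each lowercased character and collapses underscore runs inline with a previous-was-underscore flag.
import Mathlib
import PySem

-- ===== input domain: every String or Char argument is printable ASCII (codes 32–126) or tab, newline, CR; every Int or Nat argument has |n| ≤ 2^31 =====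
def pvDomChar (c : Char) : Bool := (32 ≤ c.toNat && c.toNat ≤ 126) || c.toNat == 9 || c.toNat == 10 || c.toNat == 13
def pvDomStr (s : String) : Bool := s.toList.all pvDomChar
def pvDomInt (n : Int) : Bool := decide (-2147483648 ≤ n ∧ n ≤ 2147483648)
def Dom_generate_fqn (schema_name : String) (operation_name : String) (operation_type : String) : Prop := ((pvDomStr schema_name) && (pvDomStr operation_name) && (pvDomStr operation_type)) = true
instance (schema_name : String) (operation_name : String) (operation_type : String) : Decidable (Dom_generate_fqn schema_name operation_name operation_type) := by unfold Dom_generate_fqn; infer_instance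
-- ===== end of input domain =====

-- B replaces A's multi-pass pipeline (two str.replace passes, a join-filter and a repeated
-- '__'-replace loop per name) by one fused pass per name that maps each lowercased character
-- and collapses underscore runs inline with a flag (objective: alternative, single fused pass per name).

-- ===== PORT A =====
-- pvRep2 is the effect of ONE Python `s.replace("__", "_")` pass (left-to-right,
-- non-overlapping); it is needed by name for the termination proof of pvCollapseLoopA.
def pvRep2 : List Char → List Char
  | [] => []
  | [c] => [c]
  | c :: d :: t => if c = '_' ∧ d = '_' then '_' :: pvRep2 t else c :: pvRep2 (d :: t)

def pvHasPair : List Char → Bool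
  | [] => false
  | c :: t => (c == '_' && t.head? == some '_') || pvHasPair t

lemma pvRep2_cons2 (c d : Char) (t : List Char) :
    pvRep2 (c :: d :: t) = if c = '_' ∧ d = '_' then '_' :: pvRep2 t else c :: pvRep2 (d :: t) := by
  rw [pvRep2]

lemma pv_go_pair : ∀ (fuel : Nat) (l acc : List Char), l.length ≤ fuel →
    PySem.Chars.replace.go ['_','_'] ['_'] fuel l acc = acc.reverse ++ pvRep2 l := by
  intro fuel
  induction fuel with
  | zero =>
    intro l acc h
    have : l = [] := by cases l <;> simp_all
    subst this; simp [PySem.Chars.replace.go, pvRep2]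
  | succ n ih =>
    intro l acc h
    match l with
    | [] => simp [PySem.Chars.replace.go, pvRep2]
    | [c] =>
      rw [PySem.Chars.replace.go]
      have hp : (List.isPrefixOf ['_','_'] [c]) = false := by simp [List.isPrefixOf]
      rw [hp]; simp only [Bool.false_eq_true, if_false]
      rw [ih [] (c :: acc) (Nat.zero_le n)]; simp [pvRep2]
    | c :: d :: t =>
      rw [PySem.Chars.replace.go]
      by_cases hc : c = '_' ∧ d = '_'
      · obtain ⟨h1, h2⟩ := hc
        subst h1; subst h2
        have hp : (List.isPrefixOf ['_','_'] ('_' :: '_' :: t)) = true := by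
          simp [List.isPrefixOf]
        rw [hp]; simp only [if_pos]
        rw [show (List.drop ['_','_'].length ('_'::'_'::t)) = t by simp]
        rw [ih t _ (by simp at h; omega)]
        simp [pvRep2]
      · have hp : (List.isPrefixOf ['_','_'] (c :: d :: t)) = false := by
          simp [List.isPrefixOf]
          intro h1 h2; exact absurd ⟨h1.symm, h2.symm⟩ hc
        rw [hp]; simp only [Bool.false_eq_true, if_false]
        rw [ih (d :: t) _ (by simp at h ⊢; omega), pvRep2_cons2, if_neg hc]
        simp

lemma pv_replace_pair (s : List Char) :
    PySem.Chars.replace s ['_','_'] ['_'] = pvRep2 s := by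
  rw [PySem.Chars.replace]
  simp only [List.isEmpty, Bool.false_eq_true, if_false]
  rw [pv_go_pair s.length s [] le_rfl]; simp

lemma pvHasPair_iff_infix : ∀ s : List Char, pvHasPair s = true ↔ ['_','_'] <:+: s := by
  intro s
  induction s with
  | nil => simp [pvHasPair]
  | cons c t ih =>
    rw [pvHasPair, List.infix_cons_iff]
    constructor
    · intro h
      rcases Bool.or_eq_true_iff.mp h with h | h
      · left
        have h1 : c = '_' := by simpa using (Bool.and_eq_true_iff.mp h).1
        have h2 : t.head? = some '_' := by simpa using (Bool.and_eq_true_iff.mp h).2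
        cases t with
        | nil => simp at h2
        | cons d t' =>
          simp at h2; subst h1; subst h2
          exact ⟨t', rfl⟩
      · exact Or.inr (ih.mp h)
    · intro h
      rcases h with h | h
      · cases t with
        | nil => simpa using h.length_le
        | cons d t' =>
          rcases List.cons_prefix_cons.mp h with ⟨h1, h2⟩
          rcases List.cons_prefix_cons.mp h2 with ⟨h3, _⟩
          subst h1; subst h3; simp
      · exact Bool.or_eq_true_iff.mpr (Or.inr (ih.mpr h))

lemma pv_isIn_pair (s : List Char) : PySem.Chars.isIn ['_','_'] s = pvHasPair s := by
  cases h : pvHasPair s with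
  | true => exact (PySem.Chars.isIn_iff_infix _ _).mpr ((pvHasPair_iff_infix s).mp h)
  | false =>
    exact (PySem.Chars.isIn_eq_false_iff _ _).mpr
      (fun hin => by rw [(pvHasPair_iff_infix s).mpr hin] at h; exact absurd h (by simp))

lemma pvRep2_length_le : ∀ s : List Char, (pvRep2 s).length ≤ s.length := by
  intro s
  induction s using pvRep2.induct with
  | case1 => simp [pvRep2]
  | case2 c => simp [pvRep2]
  | case3 c d t h ih => rw [pvRep2, if_pos h]; simp; omega
  | case4 c d t h ih => rw [pvRep2, if_neg h]; simpa using ih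

lemma pvRep2_length_lt : ∀ s : List Char, pvHasPair s = true → (pvRep2 s).length < s.length := by
  intro s
  induction s using pvRep2.induct with
  | case1 => simp [pvHasPair]
  | case2 c => simp [pvHasPair]
  | case3 c d t h ih =>
    intro _
    rw [pvRep2, if_pos h]
    have := pvRep2_length_le t
    simp; omega
  | case4 c d t h ih =>
    intro hp
    rw [pvRep2, if_neg h]
    have hdt : pvHasPair (d :: t) = true := by
      rw [pvHasPair] at hp
      rcases Bool.or_eq_true_iff.mp hp with h' | h'
      · exact absurd ⟨by simpa using (Bool.and_eq_true_iff.mp h').1,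
          by simpa using (Bool.and_eq_true_iff.mp h').2⟩ h
      · exact h'
    simpa using ih hdt

-- Python:  while "__" in s: s = s.replace("__", "_")
def pvCollapseLoopA (s : List Char) : List Char :=
  if PySem.Chars.isIn ['_','_'] s then pvCollapseLoopA (PySem.Chars.replace s ['_','_'] ['_']) else s
termination_by s.length
decreasing_by
  rw [pv_replace_pair]
  exact pvRep2_length_lt s (by rw [← pv_isIn_pair]; assumption)

def generate_fqn (schema_name : String) (operation_name : String) (operation_type : String) : String :=
  -- normalized_name = schema_name.lower().replace(" ", "_").replace("-", "_")
  let n0 := PySem.Chars.replace (PySem.Chars.replace (PySem.Chars.lower schema_name.toList) [' '] ['_']) ['-'] ['_']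
  -- "".join(c if c.isalnum() or c == "_" else "" for c in normalized_name)
  let n1 := n0.flatMap (fun c => if PySem.Chars.isalnum c || c == '_' then [c] else [])
  -- while "__" in …: replace;  then .strip("_")
  let n2 := PySem.Chars.stripChars (pvCollapseLoopA n1) ['_']
  let nm := if n2 = [] then "unknown".toList else n2
  -- normalized_op
  let o1 := (PySem.Chars.lower operation_name.toList).map (fun c => if PySem.Chars.isalnum c || c == '_' then c else '_')
  let o2 := PySem.Chars.stripChars (pvCollapseLoopA o1) ['_']
  let op := if o2 = [] then "unknown".toList else o2
  String.ofList ("graphql.".toList ++ nm ++ ".".toList ++ operation_type.toList ++ "_".toList ++ op)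

-- ===== PORT B =====
-- one fused pass over the lowercased schema name: map each char, collapse '_' runs inline
def pvSchemaPass : Bool → List Char → List Char
  | _, [] => []
  | prev, c :: t =>
    if PySem.Chars.isalnum c then c :: pvSchemaPass false t
    else if c == ' ' || c == '-' || c == '_' then
      (if prev then pvSchemaPass true t else '_' :: pvSchemaPass true t)
    else pvSchemaPass prev t

-- one fused pass over the lowercased operation name
def pvOpPass : Bool → List Char → List Char
  | _, [] => []
  | prev, c :: t =>
    if PySem.Chars.isalnum c then c :: pvOpPass false t
    else if prev then pvOpPass true t else '_' :: pvOpPass true t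

def generate_fqn_alt (schema_name : String) (operation_name : String) (operation_type : String) : String :=
  let nm0 := PySem.Chars.stripChars (pvSchemaPass false (PySem.Chars.lower schema_name.toList)) ['_']
  let nm := if nm0 = [] then "unknown".toList else nm0
  let op0 := PySem.Chars.stripChars (pvOpPass false (PySem.Chars.lower operation_name.toList)) ['_']
  let op := if op0 = [] then "unknown".toList else op0
  String.ofList ("graphql.".toList ++ nm ++ ".".toList ++ operation_type.toList ++ "_".toList ++ op)

-- ===== PRECONDITION & SPEC =====
def Spec_generate_fqn (schema_name : String) (operation_name : String) (operation_type : String) (out : String) : Prop := out = generate_fqn_alt schema_name operation_name operation_type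
instance (schema_name : String) (operation_name : String) (operation_type : String) (out : String) : Decidable (Spec_generate_fqn schema_name operation_name operation_type out) := by unfold Spec_generate_fqn; infer_instance

-- ===== CLAIM (what is proved, stated in full; the proofs are below) =====
def Claim_equal_generate_fqn : Prop := ∀ (schema_name : String) (operation_name : String) (operation_type : String), Dom_generate_fqn schema_name operation_name operation_type → Spec_generate_fqn schema_name operation_name operation_type (generate_fqn schema_name operation_name operation_type)

-- ===== LEMMAS AND PROOFS =====

-- the canonical '_'-run collapse, with a 'previous char was an emitted underscore' flag
def pvDedupUS : Bool → List Char → List Char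
  | _, [] => []
  | b, c :: t => if c = '_' then (if b then pvDedupUS true t else '_' :: pvDedupUS true t) else c :: pvDedupUS false t

lemma pvDedupUS_rep2 : ∀ (s : List Char) (b : Bool), pvDedupUS b (pvRep2 s) = pvDedupUS b s := by
  intro s
  induction s using pvRep2.induct with
  | case1 => intro b; simp [pvRep2]
  | case2 c => intro b; simp [pvRep2]
  | case3 c d t h ih =>
    intro b
    obtain ⟨h1, h2⟩ := h
    subst h1; subst h2
    rw [pvRep2, if_pos ⟨rfl, rfl⟩]
    cases b <;> simp [pvDedupUS, ih]
  | case4 c d t h ih =>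
    intro b
    rw [pvRep2, if_neg h]
    by_cases hc : c = '_' <;> cases b <;> simp [pvDedupUS, hc, ih]

lemma pv_noPair_dedup : ∀ s : List Char, pvHasPair s = false →
    (pvDedupUS false s = s ∧ (s.head? ≠ some '_' → pvDedupUS true s = s)) := by
  intro s
  induction s with
  | nil => simp [pvDedupUS]
  | cons c t ih =>
    intro h
    rw [pvHasPair] at h
    have ht : pvHasPair t = false := by
      rcases Bool.or_eq_false_iff.mp h with ⟨_, h2⟩; exact h2
    by_cases hc : c = '_'
    · subst hc
      have hhd : t.head? ≠ some '_' := by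
        rcases Bool.or_eq_false_iff.mp h with ⟨h1, _⟩
        simp at h1; simpa using h1
      constructor
      · simp [pvDedupUS, (ih ht).2 hhd]
      · intro hh; simp at hh
    · constructor
      · simp [pvDedupUS, hc, (ih ht).1]
      · intro _; simp [pvDedupUS, hc, (ih ht).1]

lemma pvCollapseLoopA_eq_dedup : ∀ s : List Char, pvCollapseLoopA s = pvDedupUS false s := by
  intro s
  induction s using pvCollapseLoopA.induct with
  | case1 s h ih =>
    rw [pvCollapseLoopA, if_pos h, ih, pv_replace_pair, pvDedupUS_rep2]
  | case2 s h =>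
    rw [pvCollapseLoopA, if_neg h]
    have hp : pvHasPair s = false := by
      rw [← pv_isIn_pair]; simpa using h
    exact ((pv_noPair_dedup s hp).1).symm

lemma pv_isalnum_ne_us {c : Char} (h : PySem.Chars.isalnum c = true) : ¬ c = '_' := by
  intro hc; subst hc; exact absurd h (by decide)

-- B's per-character schema mapping as a list-valued function
lemma pvSchemaPass_eq : ∀ (l : List Char) (b : Bool),
    pvSchemaPass b l = pvDedupUS b (l.flatMap (fun c =>
      if PySem.Chars.isalnum c then [c]
      else if c == ' ' || c == '-' || c == '_' then ['_'] else [])) := by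
  intro l
  induction l with
  | nil => intro b; simp [pvSchemaPass, pvDedupUS]
  | cons c t ih =>
    intro b
    rw [List.flatMap_cons]
    by_cases ha : PySem.Chars.isalnum c = true
    · rw [pvSchemaPass, if_pos ha]
      simp only [ha, if_pos]
      simp [pvDedupUS, pv_isalnum_ne_us ha, ih]
    · by_cases hs : (c == ' ' || c == '-' || c == '_') = true
      · rw [pvSchemaPass, if_neg ha, if_pos hs]
        simp only [ha, Bool.false_eq_true, if_false, hs, if_pos]
        cases b <;> simp [pvDedupUS, ih]
      · rw [pvSchemaPass, if_neg ha, if_neg hs]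
        simp only [ha, Bool.false_eq_true, if_false, hs, List.nil_append]
        exact ih b

lemma pvOpPass_eq : ∀ (l : List Char) (b : Bool),
    pvOpPass b l = pvDedupUS b (l.map (fun c =>
      if PySem.Chars.isalnum c then c else '_')) := by
  intro l
  induction l with
  | nil => intro b; simp [pvOpPass, pvDedupUS]
  | cons c t ih =>
    intro b
    rw [List.map_cons]
    by_cases ha : PySem.Chars.isalnum c = true
    · rw [pvOpPass, if_pos ha]
      simp only [ha, if_pos]
      simp [pvDedupUS, pv_isalnum_ne_us ha, ih]
    · rw [pvOpPass, if_neg ha]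
      simp only [ha, Bool.false_eq_true, if_false]
      cases b <;> simp [pvDedupUS, ih]

lemma pv_go_single (a b : Char) : ∀ (fuel : Nat) (l acc : List Char), l.length ≤ fuel →
    PySem.Chars.replace.go [a] [b] fuel l acc
      = acc.reverse ++ l.map (fun c => if c = a then b else c) := by
  intro fuel
  induction fuel with
  | zero =>
    intro l acc h
    have : l = [] := by cases l <;> simp_all
    subst this; simp [PySem.Chars.replace.go]
  | succ n ih =>
    intro l acc h
    match l with
    | [] => simp [PySem.Chars.replace.go]
    | c :: t =>
      rw [PySem.Chars.replace.go]
      by_cases hc : c = a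
      · subst hc
        have hp : (List.isPrefixOf [c] (c :: t)) = true := by simp [List.isPrefixOf]
        rw [hp]; simp only [if_pos]
        rw [show (List.drop [c].length (c :: t)) = t by simp]
        rw [ih t _ (by simp at h; omega)]
        simp
      · have hp : (List.isPrefixOf [a] (c :: t)) = false := by
          simp [List.isPrefixOf]; intro h1; exact absurd h1.symm hc
        rw [hp]; simp only [Bool.false_eq_true, if_false]
        rw [ih t _ (by simp at h; omega)]
        simp [hc]

lemma pv_replace_single (s : List Char) (a b : Char) :
    PySem.Chars.replace s [a] [b] = s.map (fun c => if c = a then b else c) := by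
  rw [PySem.Chars.replace]
  simp only [List.isEmpty, Bool.false_eq_true, if_false]
  rw [pv_go_single a b s.length s [] le_rfl]; simp

-- per-character agreement of A's replace-replace-filter with B's schema mapping
lemma pv_schema_char (c : Char) :
    (if PySem.Chars.isalnum ((fun x => if x = '-' then '_' else x) ((fun x => if x = ' ' then '_' else x) c))
        || ((fun x => if x = '-' then '_' else x) ((fun x => if x = ' ' then '_' else x) c)) == '_'
     then [(fun x => if x = '-' then '_' else x) ((fun x => if x = ' ' then '_' else x) c)] else [])
      = (if PySem.Chars.isalnum c then [c]
         else if c == ' ' || c == '-' || c == '_' then ['_'] else []) := by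
  by_cases h1 : c = ' '
  · subst h1; decide
  · by_cases h2 : c = '-'
    · subst h2; decide
    · by_cases h3 : c = '_'
      · subst h3; decide
      · simp only [if_neg h1, if_neg h2]
        by_cases ha : PySem.Chars.isalnum c = true
        · simp [ha]
        · simp [ha, h1, h2, h3]

lemma pv_op_char (c : Char) :
    (if PySem.Chars.isalnum c || c == '_' then c else '_')
      = (if PySem.Chars.isalnum c then c else '_') := by
  by_cases h : c = '_'
  · subst h; decide
  · by_cases ha : PySem.Chars.isalnum c = true <;> simp [ha, h]

-- A's fully mapped schema list equals B's flatMap form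
lemma pv_schema_list (l : List Char) :
    (PySem.Chars.replace (PySem.Chars.replace l [' '] ['_']) ['-'] ['_']).flatMap
        (fun c => if PySem.Chars.isalnum c || c == '_' then [c] else [])
      = l.flatMap (fun c =>
          if PySem.Chars.isalnum c then [c]
          else if c == ' ' || c == '-' || c == '_' then ['_'] else []) := by
  rw [pv_replace_single, pv_replace_single, List.map_map, List.flatMap_map]
  exact List.flatMap_congr (fun c _ => pv_schema_char c)

-- ===== VERDICT (by name: the statement is the Claim_ definition above) =====
theorem generate_fqn_spec : Claim_equal_generate_fqn := by
  intro s o t _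
  unfold Spec_generate_fqn generate_fqn generate_fqn_alt
  dsimp only
  rw [pv_schema_list, pvCollapseLoopA_eq_dedup, ← pvSchemaPass_eq]
  rw [show ((PySem.Chars.lower o.toList).map (fun c => if PySem.Chars.isalnum c || c == '_' then c else '_'))
        = ((PySem.Chars.lower o.toList).map (fun c => if PySem.Chars.isalnum c then c else '_')) from
      List.map_congr_left (fun c _ => pv_op_char c)]
  rw [pvCollapseLoopA_eq_dedup, ← pvOpPass_eq]
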